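-- pv_equiv track=rewrite | github.com/DPNT-Sourcecode/CHK-pqqk01 | lib/solutions/CHK/checkout_solution.py | specialOffers
-- ===== SOURCE A (Python) =====
-- def specialOffers(i,val,discount,items):
-- 	if i == 'A':
-- 		if(val>=5):
-- 			count = 0
-- 			while (val >= 5):
-- 				val = val -5
-- 				count = count + 1
-- 			discount = discount - ( count * 50)
-- 		if(val>=3):
-- 			discount = discount - 20
-- 	elif i == 'B':
-- 		if items['E']>=2 and val!=0:
-- 			aux = items['E']
-- 			while aux >= 2:
-- 				aux = aux -2
-- 				val = val -1
-- 				discount = discount - 30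
-- 		if(val>=2):
-- 			while (val >= 2):
-- 				val = val - 2
-- 				discount = discount - 15
-- 	elif i == 'F':
-- 		if val>=3:
-- 			while val >= 3:
-- 				val = val - 3
-- 				discount = discount - 10
-- 	elif i == 'H':
-- 		if(val>=10):
-- 			count = 0
-- 			while (val >= 10):
-- 				val = val -10
-- 				count = count + 1
-- 			discount = discount - ( count * 20)
-- 		if(val>=5):
-- 			discount = discount - 5
-- 	elif i == 'K':
-- 		if(val>=2):
-- 			while (val >= 2):
-- 				val = val - 2
-- 				discount = discount - 20
-- 	elif i == 'N':
-- 		if(val>=3 and items['M']!=0):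
-- 			while (val >= 3 and items['M']!=0 ):
-- 				val = val - 3
-- 				items['M'] = items['M'] - 1
-- 				discount = discount - 15
-- 	elif i == 'P':
-- 		if(val>=5):
-- 			count = 0
-- 			while (val >= 5):
-- 				val = val -5
-- 				count = count + 1
-- 			discount = discount - ( count * 50)
-- 	elif i == 'Q':
-- 		if items['R']>=3 and val!=0:
-- 			aux = items['R']
-- 			while aux >= 3:
-- 				aux = aux - 3
-- 				val = val - 1
-- 				discount = discount - 30
-- 		if(val>=3):
-- 			while (val >= 3):
-- 				val = val - 3
-- 				discount = discount - 10
-- 	elif i == 'U':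
-- 		if val>=4:
-- 			while val >= 4:
-- 				val = val - 4
-- 				discount = discount - 40
-- 	elif i == 'V':
-- 		if(val>=3):
-- 			count = 0
-- 			while (val >= 3):
-- 				val = val -3
-- 				count = count + 1
-- 			discount = discount - ( count * 20)
-- 		if(val>=2):
-- 			discount = discount - 10
-- 	return int(discount)
-- ===== SOURCE B (Python) =====
-- # Closed-form checkout discounts: each repeated-subtraction loop becomes one
-- # integer division (min for the N offer capped by the stock of M), which reads shorter.
-- # For i == 'N' this updates items['M'] in place, like the offer consumes M's.
--
-- def specialOffers(i, val, discount, items):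
--     if i == 'A':
--         if val >= 5:
--             discount -= 50 * (val // 5)
--             val %= 5
--         if val >= 3:
--             discount -= 20
--     elif i == 'B':
--         e = items['E']
--         if e >= 2 and val != 0:
--             val -= e // 2
--             discount -= 30 * (e // 2)
--         if val >= 2:
--             discount -= 15 * (val // 2)
--     elif i == 'F':
--         if val >= 3:
--             discount -= 10 * (val // 3)
--     elif i == 'H':
--         if val >= 10:
--             discount -= 20 * (val // 10)
--             val %= 10
--         if val >= 5:
--             discount -= 5
--     elif i == 'K':
--         if val >= 2:
--             discount -= 20 * (val // 2)
--     elif i == 'N':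
--         if val >= 3 and items['M'] != 0:
--             n = min(val // 3, items['M'])
--             discount -= 15 * n
--             items['M'] -= n
--     elif i == 'P':
--         if val >= 5:
--             discount -= 50 * (val // 5)
--     elif i == 'Q':
--         r = items['R']
--         if r >= 3 and val != 0:
--             val -= r // 3
--             discount -= 30 * (r // 3)
--         if val >= 3:
--             discount -= 10 * (val // 3)
--     elif i == 'U':
--         if val >= 4:
--             discount -= 40 * (val // 4)
--     elif i == 'V':
--         if val >= 3:
--             discount -= 20 * (val // 3)
--             val %= 3
--         if val >= 2:
--             discount -= 10
--     return int(discount)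
-- ===== Notes on version B (the rewrite author's own statement) =====
-- stated objective: simpler
-- what changed: Every repeated-subtraction while-loop is replaced by one closed-form integer division (min against the stock of M for the coupled N offer); Pre_ excludes the KeyError inputs and negative items['M'] for the N offer, a count outside the natural domain where A's loop termination is accidental.
-- outside the precondition, e.g. on specialOffers('N', 3, 0, {'M': -1}): A returns -15, B returns 15
import Mathlib
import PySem

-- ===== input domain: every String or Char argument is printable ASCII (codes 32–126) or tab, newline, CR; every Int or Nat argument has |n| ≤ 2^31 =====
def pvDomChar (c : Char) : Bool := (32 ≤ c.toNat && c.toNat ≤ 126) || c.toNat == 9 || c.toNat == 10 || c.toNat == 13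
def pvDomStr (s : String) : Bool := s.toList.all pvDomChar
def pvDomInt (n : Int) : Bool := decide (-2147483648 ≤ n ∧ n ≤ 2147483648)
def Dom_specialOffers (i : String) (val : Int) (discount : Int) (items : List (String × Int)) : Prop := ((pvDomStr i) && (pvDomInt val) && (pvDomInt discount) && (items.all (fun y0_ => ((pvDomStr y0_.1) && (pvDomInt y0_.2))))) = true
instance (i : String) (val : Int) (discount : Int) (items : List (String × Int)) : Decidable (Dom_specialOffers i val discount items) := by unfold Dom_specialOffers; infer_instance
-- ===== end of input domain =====

-- B replaces A's repeated-subtraction while-loops by one integer division per offer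
-- (min against the stock of M for the coupled N offer); objective: simpler.
-- A mutates items['M'] in the 'N' branch; Source B performs the same mutation, and the
-- equivalence proved here is about the RETURN value.

-- ===== PORT A =====
-- items[k] : first match in the association list (Pre_ excludes the KeyError cases)
def dget (items : List (String × Int)) (k : String) : Int :=
  (List.lookup k items).getD 0

-- while (val >= s): val -= s; count += 1
def countLoop (s : Int) (hs : 0 < s) (val count : Int) : Int × Int :=
  if _h : s ≤ val then countLoop s hs (val - s) (count + 1) else (val, count)
termination_by val.toNat
decreasing_by omega

-- while (val >= s): val -= s; discount -= dec
def discLoop (s : Int) (hs : 0 < s) (dec val discount : Int) : Int × Int :=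
  if _h : s ≤ val then discLoop s hs dec (val - s) (discount - dec) else (val, discount)
termination_by val.toNat
decreasing_by omega

-- while (aux >= s): aux -= s; val -= 1; discount -= dec
def pairLoop (s : Int) (hs : 0 < s) (dec aux val discount : Int) : Int × Int × Int :=
  if _h : s ≤ aux then pairLoop s hs dec (aux - s) (val - 1) (discount - dec)
  else (aux, val, discount)
termination_by aux.toNat
decreasing_by omega

-- while (val >= 3 and m != 0): val -= 3; m -= 1; discount -= 15
def nLoop (val m discount : Int) : Int × Int × Int :=
  if _h : 3 ≤ val ∧ m ≠ 0 then nLoop (val - 3) (m - 1) (discount - 15)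
  else (val, m, discount)
termination_by val.toNat
decreasing_by omega

def specialOffers (i : String) (val : Int) (discount : Int) (items : List (String × Int)) : Int :=
  if i = "A" then
    let vd := if 5 ≤ val then
        let vc := countLoop 5 (by norm_num) val 0
        (vc.1, discount - vc.2 * 50)
      else (val, discount)
    if 3 ≤ vd.1 then vd.2 - 20 else vd.2
  else if i = "B" then
    let vd := if 2 ≤ dget items "E" ∧ val ≠ 0 then
        let r := pairLoop 2 (by norm_num) 30 (dget items "E") val discount
        (r.2.1, r.2.2)
      else (val, discount)
    if 2 ≤ vd.1 then (discLoop 2 (by norm_num) 15 vd.1 vd.2).2 else vd.2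
  else if i = "F" then
    if 3 ≤ val then (discLoop 3 (by norm_num) 10 val discount).2 else discount
  else if i = "H" then
    let vd := if 10 ≤ val then
        let vc := countLoop 10 (by norm_num) val 0
        (vc.1, discount - vc.2 * 20)
      else (val, discount)
    if 5 ≤ vd.1 then vd.2 - 5 else vd.2
  else if i = "K" then
    if 2 ≤ val then (discLoop 2 (by norm_num) 20 val discount).2 else discount
  else if i = "N" then
    if 3 ≤ val ∧ dget items "M" ≠ 0 then (nLoop val (dget items "M") discount).2.2
    else discount
  else if i = "P" then
    if 5 ≤ val then discount - (countLoop 5 (by norm_num) val 0).2 * 50 else discount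
  else if i = "Q" then
    let vd := if 3 ≤ dget items "R" ∧ val ≠ 0 then
        let r := pairLoop 3 (by norm_num) 30 (dget items "R") val discount
        (r.2.1, r.2.2)
      else (val, discount)
    if 3 ≤ vd.1 then (discLoop 3 (by norm_num) 10 vd.1 vd.2).2 else vd.2
  else if i = "U" then
    if 4 ≤ val then (discLoop 4 (by norm_num) 40 val discount).2 else discount
  else if i = "V" then
    let vd := if 3 ≤ val then
        let vc := countLoop 3 (by norm_num) val 0
        (vc.1, discount - vc.2 * 20)
      else (val, discount)
    if 2 ≤ vd.1 then vd.2 - 10 else vd.2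
  else discount

-- ===== PORT B =====
def specialOffers_alt (i : String) (val : Int) (discount : Int) (items : List (String × Int)) : Int :=
  if i = "A" then
    let vd := if 5 ≤ val then (PySem.Int.mod val 5, discount - 50 * PySem.Int.floordiv val 5)
              else (val, discount)
    if 3 ≤ vd.1 then vd.2 - 20 else vd.2
  else if i = "B" then
    let e := dget items "E"
    let vd := if 2 ≤ e ∧ val ≠ 0 then
        (val - PySem.Int.floordiv e 2, discount - 30 * PySem.Int.floordiv e 2)
      else (val, discount)
    if 2 ≤ vd.1 then vd.2 - 15 * PySem.Int.floordiv vd.1 2 else vd.2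
  else if i = "F" then
    if 3 ≤ val then discount - 10 * PySem.Int.floordiv val 3 else discount
  else if i = "H" then
    let vd := if 10 ≤ val then (PySem.Int.mod val 10, discount - 20 * PySem.Int.floordiv val 10)
              else (val, discount)
    if 5 ≤ vd.1 then vd.2 - 5 else vd.2
  else if i = "K" then
    if 2 ≤ val then discount - 20 * PySem.Int.floordiv val 2 else discount
  else if i = "N" then
    if 3 ≤ val ∧ dget items "M" ≠ 0 then
      discount - 15 * min (PySem.Int.floordiv val 3) (dget items "M")
    else discount
  else if i = "P" then
    if 5 ≤ val then discount - 50 * PySem.Int.floordiv val 5 else discount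
  else if i = "Q" then
    let r := dget items "R"
    let vd := if 3 ≤ r ∧ val ≠ 0 then
        (val - PySem.Int.floordiv r 3, discount - 30 * PySem.Int.floordiv r 3)
      else (val, discount)
    if 3 ≤ vd.1 then vd.2 - 10 * PySem.Int.floordiv vd.1 3 else vd.2
  else if i = "U" then
    if 4 ≤ val then discount - 40 * PySem.Int.floordiv val 4 else discount
  else if i = "V" then
    let vd := if 3 ≤ val then (PySem.Int.mod val 3, discount - 20 * PySem.Int.floordiv val 3)
              else (val, discount)
    if 2 ≤ vd.1 then vd.2 - 10 else vd.2
  else discount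

-- ===== PRECONDITION & SPEC =====
-- Pre_ excludes the inputs on which A raises KeyError ('B' without key 'E', 'Q' without
-- key 'R', 'N' with val >= 3 but no key 'M'; B raises there too), and, for the 'N'
-- offer, a negative items['M']: a negative stock count is outside the natural domain,
-- and there A's loop-termination behaviour (m never reaching 0) is accidental.
def Pre_specialOffers (i : String) (val : Int) (discount : Int) (items : List (String × Int)) : Prop :=
  (i = "B" → (List.lookup "E" items).isSome = true) ∧
  (i = "Q" → (List.lookup "R" items).isSome = true) ∧
  (i = "N" → 3 ≤ val → (List.lookup "M" items).isSome = true ∧ 0 ≤ (List.lookup "M" items).getD 0)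
instance (i : String) (val : Int) (discount : Int) (items : List (String × Int)) : Decidable (Pre_specialOffers i val discount items) := by unfold Pre_specialOffers; infer_instance

def pvWitness_specialOffers : String × Int × Int × (List (String × Int)) :=
  ("B", 7, 0, [("E", 5)])

def Spec_specialOffers (i : String) (val : Int) (discount : Int) (items : List (String × Int)) (out : Int) : Prop := out = specialOffers_alt i val discount items
instance (i : String) (val : Int) (discount : Int) (items : List (String × Int)) (out : Int) : Decidable (Spec_specialOffers i val discount items out) := by unfold Spec_specialOffers; infer_instance

-- ===== CLAIM (what is proved, stated in full; the proofs are below) =====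
def Claim_equal_specialOffers : Prop := ∀ (i : String) (val : Int) (discount : Int) (items : List (String × Int)), Dom_specialOffers i val discount items → Pre_specialOffers i val discount items → Spec_specialOffers i val discount items (specialOffers i val discount items)

-- ===== LEMMAS AND PROOFS =====
theorem countLoop_eq5 (h : (0:Int) < 5) (val count : Int) :
    countLoop 5 h val count = (val - 5 * (max val 0 / 5), count + max val 0 / 5) := by
  fun_induction countLoop with
  | case1 val count h ih => rw [ih, Prod.mk.injEq]; constructor <;> omega
  | case2 val count h => rw [Prod.mk.injEq]; constructor <;> omega

theorem countLoop_eq10 (h : (0:Int) < 10) (val count : Int) :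
    countLoop 10 h val count = (val - 10 * (max val 0 / 10), count + max val 0 / 10) := by
  fun_induction countLoop with
  | case1 val count h ih => rw [ih, Prod.mk.injEq]; constructor <;> omega
  | case2 val count h => rw [Prod.mk.injEq]; constructor <;> omega

theorem countLoop_eq3 (h : (0:Int) < 3) (val count : Int) :
    countLoop 3 h val count = (val - 3 * (max val 0 / 3), count + max val 0 / 3) := by
  fun_induction countLoop with
  | case1 val count h ih => rw [ih, Prod.mk.injEq]; constructor <;> omega
  | case2 val count h => rw [Prod.mk.injEq]; constructor <;> omega

theorem discLoop_eq2_15 (h : (0:Int) < 2) (val d : Int) :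
    discLoop 2 h 15 val d = (val - 2 * (max val 0 / 2), d - 15 * (max val 0 / 2)) := by
  fun_induction discLoop with
  | case1 val d h ih => rw [ih, Prod.mk.injEq]; constructor <;> omega
  | case2 val d h => rw [Prod.mk.injEq]; constructor <;> omega

theorem discLoop_eq2_20 (h : (0:Int) < 2) (val d : Int) :
    discLoop 2 h 20 val d = (val - 2 * (max val 0 / 2), d - 20 * (max val 0 / 2)) := by
  fun_induction discLoop with
  | case1 val d h ih => rw [ih, Prod.mk.injEq]; constructor <;> omega
  | case2 val d h => rw [Prod.mk.injEq]; constructor <;> omega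

theorem discLoop_eq3_10 (h : (0:Int) < 3) (val d : Int) :
    discLoop 3 h 10 val d = (val - 3 * (max val 0 / 3), d - 10 * (max val 0 / 3)) := by
  fun_induction discLoop with
  | case1 val d h ih => rw [ih, Prod.mk.injEq]; constructor <;> omega
  | case2 val d h => rw [Prod.mk.injEq]; constructor <;> omega

theorem discLoop_eq4_40 (h : (0:Int) < 4) (val d : Int) :
    discLoop 4 h 40 val d = (val - 4 * (max val 0 / 4), d - 40 * (max val 0 / 4)) := by
  fun_induction discLoop with
  | case1 val d h ih => rw [ih, Prod.mk.injEq]; constructor <;> omega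
  | case2 val d h => rw [Prod.mk.injEq]; constructor <;> omega

theorem pairLoop_eq2_30 (h : (0:Int) < 2) (aux val d : Int) :
    pairLoop 2 h 30 aux val d =
      (aux - 2 * (max aux 0 / 2), val - max aux 0 / 2, d - 30 * (max aux 0 / 2)) := by
  fun_induction pairLoop with
  | case1 aux val d h ih => rw [ih]; simp only [Prod.mk.injEq]; refine ⟨?_, ?_, ?_⟩ <;> omega
  | case2 aux val d h => simp only [Prod.mk.injEq]; refine ⟨?_, ?_, ?_⟩ <;> omega

theorem pairLoop_eq3_30 (h : (0:Int) < 3) (aux val d : Int) :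
    pairLoop 3 h 30 aux val d =
      (aux - 3 * (max aux 0 / 3), val - max aux 0 / 3, d - 30 * (max aux 0 / 3)) := by
  fun_induction pairLoop with
  | case1 aux val d h ih => rw [ih]; simp only [Prod.mk.injEq]; refine ⟨?_, ?_, ?_⟩ <;> omega
  | case2 aux val d h => simp only [Prod.mk.injEq]; refine ⟨?_, ?_, ?_⟩ <;> omega

theorem nLoop_eq_nonneg (val m d : Int) (hm : 0 ≤ m) :
    (nLoop val m d).2.2 = d - 15 * (if 3 ≤ val ∧ m ≠ 0 then min (max val 0 / 3) m else 0) := by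
  fun_induction nLoop with
  | case1 val m d h ih =>
    rw [ih (by omega)]
    split_ifs <;> omega
  | case2 val m d h =>
    dsimp only
    split_ifs <;> omega

-- ===== VERDICT (by name: the statement is the Claim_ definition above) =====
theorem specialOffers_spec : Claim_equal_specialOffers := by
  intro i val discount items _ hPre
  obtain ⟨_, _, hN⟩ := hPre
  unfold Spec_specialOffers
  by_cases hA : i = "A"
  · subst hA
    simp only [specialOffers, specialOffers_alt, String.reduceEq, reduceIte,
      PySem.Int.floordiv_eq_ediv_of_pos (by norm_num : (0:Int) < 5),
      PySem.Int.mod_eq_emod_of_pos (by norm_num : (0:Int) < 5), countLoop_eq5]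
    split_ifs <;> omega
  by_cases hB : i = "B"
  · subst hB
    simp only [specialOffers, specialOffers_alt, String.reduceEq, reduceIte,
      PySem.Int.floordiv_eq_ediv_of_pos (by norm_num : (0:Int) < 2),
      pairLoop_eq2_30, discLoop_eq2_15]
    split_ifs <;> omega
  by_cases hF : i = "F"
  · subst hF
    simp only [specialOffers, specialOffers_alt, String.reduceEq, reduceIte,
      PySem.Int.floordiv_eq_ediv_of_pos (by norm_num : (0:Int) < 3), discLoop_eq3_10]
    split_ifs <;> omega
  by_cases hH : i = "H"
  · subst hH
    simp only [specialOffers, specialOffers_alt, String.reduceEq, reduceIte,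
      PySem.Int.floordiv_eq_ediv_of_pos (by norm_num : (0:Int) < 10),
      PySem.Int.mod_eq_emod_of_pos (by norm_num : (0:Int) < 10), countLoop_eq10]
    split_ifs <;> omega
  by_cases hK : i = "K"
  · subst hK
    simp only [specialOffers, specialOffers_alt, String.reduceEq, reduceIte,
      PySem.Int.floordiv_eq_ediv_of_pos (by norm_num : (0:Int) < 2), discLoop_eq2_20]
    split_ifs <;> omega
  by_cases hNi : i = "N"
  · subst hNi
    simp only [specialOffers, specialOffers_alt, String.reduceEq, reduceIte,
      PySem.Int.floordiv_eq_ediv_of_pos (by norm_num : (0:Int) < 3)]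
    by_cases h3 : 3 ≤ val ∧ dget items "M" ≠ 0
    · have hm : 0 ≤ dget items "M" := by
        have := (hN rfl h3.1).2
        simpa [dget] using this
      rw [if_pos h3, if_pos h3, nLoop_eq_nonneg _ _ _ hm, if_pos h3]
      omega
    · rw [if_neg h3, if_neg h3]
  by_cases hP : i = "P"
  · subst hP
    simp only [specialOffers, specialOffers_alt, String.reduceEq, reduceIte,
      PySem.Int.floordiv_eq_ediv_of_pos (by norm_num : (0:Int) < 5), countLoop_eq5]
    split_ifs <;> omega
  by_cases hQ : i = "Q"
  · subst hQ
    simp only [specialOffers, specialOffers_alt, String.reduceEq, reduceIte,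
      PySem.Int.floordiv_eq_ediv_of_pos (by norm_num : (0:Int) < 3),
      pairLoop_eq3_30, discLoop_eq3_10]
    split_ifs <;> omega
  by_cases hU : i = "U"
  · subst hU
    simp only [specialOffers, specialOffers_alt, String.reduceEq, reduceIte,
      PySem.Int.floordiv_eq_ediv_of_pos (by norm_num : (0:Int) < 4), discLoop_eq4_40]
    split_ifs <;> omega
  by_cases hV : i = "V"
  · subst hV
    simp only [specialOffers, specialOffers_alt, String.reduceEq, reduceIte,
      PySem.Int.floordiv_eq_ediv_of_pos (by norm_num : (0:Int) < 3),
      PySem.Int.mod_eq_emod_of_pos (by norm_num : (0:Int) < 3), countLoop_eq3]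
    split_ifs <;> omega
  · simp only [specialOffers, specialOffers_alt,
      if_neg hA, if_neg hB, if_neg hF, if_neg hH, if_neg hK, if_neg hNi,
      if_neg hP, if_neg hQ, if_neg hU, if_neg hV]
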